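-- pv_equiv track=rewrite | github.com/hot-zhy/interview | backend/services/selection_rl.py | _chapter_match
-- ===== SOURCE A (Python) =====
-- from typing import Dict, List, Optional
--
-- def _chapter_match(chapter: str, candidates: List[str]) -> Optional[str]:
--     if chapter in candidates:
--         return chapter
--     lower = (chapter or "").lower()
--     for c in candidates:
--         if c.lower() == lower:
--             return c
--     for c in candidates:
--         if c.lower() in lower or lower in c.lower():
--             return c
--     return None
-- ===== SOURCE B (Python) =====
-- from typing import List, Optional
--
-- def _chapter_match(chapter: str, candidates: List[str]) -> Optional[str]:
--     lower = (chapter or "").lower()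
--     best = None
--     best_rank = 3
--     for c in candidates:
--         cl = c.lower()
--         if c == chapter:
--             rank = 0
--         elif cl == lower:
--             rank = 1
--         elif cl in lower or lower in cl:
--             rank = 2
--         else:
--             continue
--         if rank < best_rank:
--             best, best_rank = c, rank
--     return best
-- ===== Notes on version B (the rewrite author's own statement) =====
-- stated objective: alternative
-- what changed: Replaced A's membership test plus two full scans (exact, caseless, substring) by a single pass that assigns each candidate a priority rank and keeps the earliest candidate of strictly lowest rank.
import Mathlib
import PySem

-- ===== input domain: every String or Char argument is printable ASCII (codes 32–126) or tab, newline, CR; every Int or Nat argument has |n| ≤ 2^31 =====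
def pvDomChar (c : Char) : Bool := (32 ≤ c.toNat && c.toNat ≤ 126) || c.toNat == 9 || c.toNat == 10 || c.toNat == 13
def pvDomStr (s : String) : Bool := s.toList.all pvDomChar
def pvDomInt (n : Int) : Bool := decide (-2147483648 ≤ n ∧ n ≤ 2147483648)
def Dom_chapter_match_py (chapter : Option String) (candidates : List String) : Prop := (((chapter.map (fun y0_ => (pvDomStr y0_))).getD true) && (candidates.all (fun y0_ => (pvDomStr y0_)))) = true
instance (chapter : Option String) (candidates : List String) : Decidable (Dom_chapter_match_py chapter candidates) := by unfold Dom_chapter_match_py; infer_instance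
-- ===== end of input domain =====

-- B replaces A's membership test plus two further full scans by a single pass that ranks
-- each candidate (0 exact, 1 caseless, 2 substring) and keeps the earliest lowest-ranked one;
-- same cost class, a genuinely different one-pass decomposition.

-- ===== PORT A =====
-- `(chapter or "")`: both None and "" are falsy and lower to "", so `.getD ""` is value-exact.
def chapter_match_py (chapter : Option String) (candidates : List String) : Option String :=
  if (match chapter with | some s => candidates.contains s | none => false) then chapter
  else
    let lower := PySem.Str.lower (chapter.getD "")
    match candidates.find? (fun c => PySem.Str.lower c == lower) with
    | some c => some c
    | none =>
      candidates.find? (fun c =>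
        PySem.Str.isIn (PySem.Str.lower c) lower || PySem.Str.isIn lower (PySem.Str.lower c))

-- ===== PORT B =====
-- rank of a candidate; 3 encodes Source B's `continue` (never stored, since best_rank ≤ 3 always)
def pvRank (chapter : Option String) (lower : String) (c : String) : Nat :=
  if some c == chapter then 0
  else if PySem.Str.lower c == lower then 1
  else if PySem.Str.isIn (PySem.Str.lower c) lower || PySem.Str.isIn lower (PySem.Str.lower c) then 2
  else 3

-- Source B's for-loop: state (best, best_rank), update on strictly smaller rank
def pvAltLoop (chapter : Option String) (lower : String) :
    List String → Option String → Nat → Option String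
  | [], best, _ => best
  | c :: rest, best, bestRank =>
    let r := pvRank chapter lower c
    if r < bestRank then pvAltLoop chapter lower rest (some c) r
    else pvAltLoop chapter lower rest best bestRank

def chapter_match_py_alt (chapter : Option String) (candidates : List String) : Option String :=
  pvAltLoop chapter (PySem.Str.lower (chapter.getD "")) candidates none 3

-- ===== PRECONDITION & SPEC =====
def Spec_chapter_match_py (chapter : Option String) (candidates : List String) (out : Option String) : Prop := out = chapter_match_py_alt chapter candidates
instance (chapter : Option String) (candidates : List String) (out : Option String) : Decidable (Spec_chapter_match_py chapter candidates out) := by unfold Spec_chapter_match_py; infer_instance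

-- ===== CLAIM (what is proved, stated in full; the proofs are below) =====
def Claim_equal_chapter_match_py : Prop := ∀ (chapter : Option String) (candidates : List String), Dom_chapter_match_py chapter candidates → Spec_chapter_match_py chapter candidates (chapter_match_py chapter candidates)

-- ===== LEMMAS AND PROOFS =====

-- minimal rank occurring in a list (3 if none below 3)
def pvMRank (chapter : Option String) (lower : String) (l : List String) : Nat :=
  (l.map (pvRank chapter lower)).foldr min 3

theorem pvMRank_nil (ch : Option String) (lower : String) : pvMRank ch lower [] = 3 := rfl

theorem pvMRank_cons (ch : Option String) (lower : String) (c : String) (l : List String) :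
    pvMRank ch lower (c :: l) = min (pvRank ch lower c) (pvMRank ch lower l) := rfl

theorem pvMRank_le_of_mem (ch : Option String) (lower : String) {c : String} {l : List String}
    (h : c ∈ l) : pvMRank ch lower l ≤ pvRank ch lower c := by
  induction l with
  | nil => cases h
  | cons a t ih =>
    rw [pvMRank_cons]
    rcases List.mem_cons.mp h with rfl | h'
    · omega
    · have := ih h'; omega

theorem le_pvMRank (ch : Option String) (lower : String) {k : Nat} {l : List String}
    (hk : k ≤ 3) (h : ∀ c ∈ l, k ≤ pvRank ch lower c) : k ≤ pvMRank ch lower l := by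
  induction l with
  | nil => simpa [pvMRank_nil]
  | cons a t ih =>
    rw [pvMRank_cons]
    have h1 := h a (List.mem_cons_self ..)
    have h2 := ih (fun c hc => h c (List.mem_cons_of_mem _ hc))
    omega

theorem pvMRank_le_three (ch : Option String) (lower : String) (l : List String) :
    pvMRank ch lower l ≤ 3 := by
  induction l with
  | nil => simp [pvMRank_nil]
  | cons a t ih => rw [pvMRank_cons]; omega

-- characterisation of B's loop: the result is the earliest element whose rank equals the
-- minimal rank of the list, provided that minimum beats the incoming best_rank
theorem pvAltLoop_char (ch : Option String) (lower : String) (l : List String) :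
    ∀ (best : Option String) (br : Nat), br ≤ 3 →
      pvAltLoop ch lower l best br =
        if pvMRank ch lower l < br then
          l.find? (fun c => pvRank ch lower c == pvMRank ch lower l)
        else best := by
  induction l with
  | nil => intro best br hbr; rw [pvMRank_nil]; simp [pvAltLoop]; omega
  | cons c rest ih =>
    intro best br hbr
    rw [pvMRank_cons]
    by_cases hlt : pvRank ch lower c < br
    · simp only [pvAltLoop, hlt, if_pos]
      rw [ih _ _ (by omega)]
      by_cases hmr : pvMRank ch lower rest < pvRank ch lower c
      · have hmin : min (pvRank ch lower c) (pvMRank ch lower rest) = pvMRank ch lower rest := by omega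
        rw [hmin, if_pos hmr, if_pos (by omega)]
        rw [List.find?_cons]
        have : (pvRank ch lower c == pvMRank ch lower rest) = false := by
          simp; omega
        rw [this]
      · have hmin : min (pvRank ch lower c) (pvMRank ch lower rest) = pvRank ch lower c := by omega
        rw [hmin, if_neg (by omega), if_pos hlt]
        rw [List.find?_cons]
        have : (pvRank ch lower c == pvRank ch lower c) = true := by simp
        rw [this]
    · simp only [pvAltLoop, hlt, if_false]
      rw [ih _ _ (by omega)]
      by_cases hmr : pvMRank ch lower rest < br
      · have hmin : min (pvRank ch lower c) (pvMRank ch lower rest) = pvMRank ch lower rest := by omega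
        rw [hmin, if_pos hmr, if_pos hmr]
        rw [List.find?_cons]
        have : (pvRank ch lower c == pvMRank ch lower rest) = false := by
          simp; omega
        rw [this]
      · have : ¬ min (pvRank ch lower c) (pvMRank ch lower rest) < br := by omega
        rw [if_neg hmr, if_neg this]

theorem pvFind?_congr_mem {p q : String → Bool} {l : List String}
    (h : ∀ a ∈ l, p a = q a) : l.find? p = l.find? q := by
  induction l with
  | nil => rfl
  | cons a t ih =>
    rw [List.find?_cons, List.find?_cons, h a (List.mem_cons_self ..)]
    cases q a
    · exact ih (fun b hb => h b (List.mem_cons_of_mem _ hb))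
    · rfl

-- unfolding facts about pvRank
theorem pvRank_eq_zero_iff (ch : Option String) (lower : String) (c : String) :
    pvRank ch lower c = 0 ↔ some c = ch := by
  unfold pvRank
  split_ifs <;> simp_all

theorem pvRank_of_not_zero (ch : Option String) (lower : String) (c : String)
    (h : ¬ some c = ch) :
    (pvRank ch lower c == 1) = (PySem.Str.lower c == lower) ∧ 1 ≤ pvRank ch lower c := by
  unfold pvRank
  have : (some c == ch) = false := by simp [h]
  simp only [this]
  split_ifs with h2 h3 <;> simp_all

theorem pvRank_of_ge_two (ch : Option String) (lower : String) (c : String)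
    (h : ¬ some c = ch) (h2 : ¬ (PySem.Str.lower c == lower) = true) :
    (pvRank ch lower c == 2) =
      (PySem.Str.isIn (PySem.Str.lower c) lower || PySem.Str.isIn lower (PySem.Str.lower c)) ∧
    2 ≤ pvRank ch lower c := by
  unfold pvRank
  have hb : (some c == ch) = false := by simp [h]
  simp only [hb, h2]
  split_ifs with h3 <;> simp_all

-- the branch of A after the exact-membership test fails, for an arbitrary `lower`
theorem pvNoExact (ch : Option String) (lower : String) (cands : List String)
    (hno0 : ∀ c ∈ cands, ¬ some c = ch) :
    (match cands.find? (fun c => PySem.Str.lower c == lower) with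
     | some c => some c
     | none =>
       cands.find? (fun c =>
         PySem.Str.isIn (PySem.Str.lower c) lower || PySem.Str.isIn lower (PySem.Str.lower c))) =
    if pvMRank ch lower cands < 3 then
      cands.find? (fun c => pvRank ch lower c == pvMRank ch lower cands)
    else none := by
  have hge1 : ∀ c ∈ cands, 1 ≤ pvRank ch lower c :=
    fun c hcm => (pvRank_of_not_zero ch lower c (hno0 c hcm)).2
  have hfind1 : cands.find? (fun c => PySem.Str.lower c == lower)
      = cands.find? (fun c => pvRank ch lower c == 1) :=
    pvFind?_congr_mem (fun c hcm => ((pvRank_of_not_zero ch lower c (hno0 c hcm)).1).symm)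
  rw [hfind1]
  cases hf1 : cands.find? (fun c => pvRank ch lower c == 1) with
  | some c =>
    -- a caseless match exists: minimal rank is 1
    have hcm : c ∈ cands := List.mem_of_find?_eq_some hf1
    have hr1 : pvRank ch lower c = 1 := by simpa using List.find?_some hf1
    have hm1 : pvMRank ch lower cands = 1 := by
      have hle := pvMRank_le_of_mem ch lower hcm
      have hge := le_pvMRank ch lower (by omega) hge1
      omega
    rw [hm1, if_pos (by omega), hf1]
  | none =>
    -- no caseless match: every rank is ≥ 2
    have hne1 : ∀ c ∈ cands, ¬ (PySem.Str.lower c == lower) = true := by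
      intro c hcm hbeq
      have := List.find?_eq_none.mp hf1 c hcm
      rw [(pvRank_of_not_zero ch lower c (hno0 c hcm)).1] at this
      exact this hbeq
    have hge2 : ∀ c ∈ cands, 2 ≤ pvRank ch lower c :=
      fun c hcm => (pvRank_of_ge_two ch lower c (hno0 c hcm) (hne1 c hcm)).2
    have hfind2 : cands.find? (fun c =>
          PySem.Str.isIn (PySem.Str.lower c) lower || PySem.Str.isIn lower (PySem.Str.lower c))
        = cands.find? (fun c => pvRank ch lower c == 2) :=
      pvFind?_congr_mem (fun c hcm =>
        ((pvRank_of_ge_two ch lower c (hno0 c hcm) (hne1 c hcm)).1).symm)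
    rw [hfind2]
    cases hf2 : cands.find? (fun c => pvRank ch lower c == 2) with
    | some c =>
      have hcm : c ∈ cands := List.mem_of_find?_eq_some hf2
      have hr2 : pvRank ch lower c = 2 := by simpa using List.find?_some hf2
      have hm2 : pvMRank ch lower cands = 2 := by
        have hle := pvMRank_le_of_mem ch lower hcm
        have hge := le_pvMRank ch lower (by omega) hge2
        omega
      rw [hm2, if_pos (by omega), hf2]
    | none =>
      -- nothing matches at all: minimal rank is 3, B keeps its initial None
      have hge3 : ∀ c ∈ cands, 3 ≤ pvRank ch lower c := by
        intro c hcm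
        have h2 := hge2 c hcm
        have := List.find?_eq_none.mp hf2 c hcm
        simp only [beq_iff_eq] at this
        omega
      have hm3 : pvMRank ch lower cands = 3 := by
        have hge := le_pvMRank ch lower (by omega) hge3
        have := pvMRank_le_three ch lower cands
        omega
      rw [hm3, if_neg (by omega)]

-- ===== VERDICT (by name: the statement is the Claim_ definition above) =====
theorem chapter_match_py_spec : Claim_equal_chapter_match_py := by
  intro ch cands _dom
  clear _dom
  unfold Spec_chapter_match_py chapter_match_py chapter_match_py_alt
  rw [pvAltLoop_char _ _ _ _ _ (le_refl 3)]
  cases ch with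
  | none =>
    -- `None in candidates` is False; no candidate has rank 0 either
    exact pvNoExact none _ cands (by intro c _ h; simp at h)
  | some s =>
    by_cases hcon : cands.contains s = true
    · -- exact membership: A returns chapter; B's minimal rank is 0, its witness equals chapter
      rw [if_pos hcon]
      have hmem : s ∈ cands := by simpa using hcon
      have hr0 : pvRank (some s) (PySem.Str.lower s) s = 0 :=
        (pvRank_eq_zero_iff _ _ s).mpr rfl
      have hm0 : pvMRank (some s) (PySem.Str.lower s) cands = 0 := by
        have := pvMRank_le_of_mem (some s) (PySem.Str.lower s) hmem
        omega
      rw [show PySem.Str.lower ((some s).getD "") = PySem.Str.lower s from rfl, hm0,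
        if_pos (by omega)]
      have hsome : (cands.find? (fun c => pvRank (some s) (PySem.Str.lower s) c == 0)).isSome := by
        rw [List.find?_isSome]; exact ⟨s, hmem, by simp [hr0]⟩
      obtain ⟨c₀, hfind⟩ := Option.isSome_iff_exists.mp hsome
      have hp := List.find?_some hfind
      have : some c₀ = some s := (pvRank_eq_zero_iff _ _ c₀).mp (by simpa using hp)
      rw [hfind, this]
    · rw [if_neg hcon]
      refine pvNoExact (some s) _ cands ?_
      intro c hcm heq
      exact hcon (by simp only [List.contains_eq_mem, decide_eq_true_iff]; exact (Option.some.inj heq) ▸ hcm)
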